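-- pv_equiv track=rewrite | github.com/nesi73/advent_of_code | day4/part2.py | count_winners
-- ===== SOURCE A (Python) =====
-- def count_winners(winners, my_numbers, current_card):
--     cont = current_card
--     cards_added = []
--
--     for num in my_numbers:
--         if num in winners:
--             cont += 1
--             cards_added.append(cont)
--
--     return cards_added
-- ===== SOURCE B (Python) =====
-- def count_winners(winners, my_numbers, current_card):
--     count = sum(1 for n in my_numbers if n in winners)
--     return [current_card + i for i in range(1, count + 1)]
-- ===== Notes on version B (the rewrite author's own statement) =====
-- stated objective: simpler
-- what changed: Replaces the interleaved count-and-append loop by a scalar match count followed by emitting current_card+i over range(1, count+1).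
import Mathlib
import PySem

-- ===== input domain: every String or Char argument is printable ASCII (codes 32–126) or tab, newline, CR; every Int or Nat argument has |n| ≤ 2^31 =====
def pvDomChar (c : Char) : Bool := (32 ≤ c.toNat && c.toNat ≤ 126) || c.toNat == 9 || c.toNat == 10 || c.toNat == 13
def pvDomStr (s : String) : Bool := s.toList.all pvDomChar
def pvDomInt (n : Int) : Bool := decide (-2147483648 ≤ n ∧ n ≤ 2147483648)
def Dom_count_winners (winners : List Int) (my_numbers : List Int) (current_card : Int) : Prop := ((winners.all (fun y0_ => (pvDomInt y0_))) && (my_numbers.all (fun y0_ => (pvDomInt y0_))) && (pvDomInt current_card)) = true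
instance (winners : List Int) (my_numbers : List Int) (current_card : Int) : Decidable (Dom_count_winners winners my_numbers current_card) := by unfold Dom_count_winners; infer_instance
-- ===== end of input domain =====

-- B replaces A's interleaved count-and-append loop by a scalar match count followed by
-- an emission pass over range(1, count+1); objective: simpler decomposition, same cost.

-- ===== PORT A =====
-- A's single loop: state (cont, cards_added); on a match, increment cont and append it.
def count_winners (winners : List Int) (my_numbers : List Int) (current_card : Int) : List Int :=
  (my_numbers.foldl
    (fun (st : Int × List Int) num =>
      if winners.contains num then (st.1 + 1, st.2 ++ [st.1 + 1]) else st)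
    (current_card, [])).2

-- ===== PORT B =====
-- B: count = sum(1 for n in my_numbers if n in winners); then [current_card + i for i in range(1, count+1)]
def count_winners_alt (winners : List Int) (my_numbers : List Int) (current_card : Int) : List Int :=
  let count : Int :=
    my_numbers.foldl (fun s n => if winners.contains n then s + 1 else s) 0
  (PySem.List.pyRange 1 (count + 1) 1).map (fun i => current_card + i)

-- ===== PRECONDITION & SPEC =====
def Spec_count_winners (winners : List Int) (my_numbers : List Int) (current_card : Int) (out : List Int) : Prop := out = count_winners_alt winners my_numbers current_card
instance (winners : List Int) (my_numbers : List Int) (current_card : Int) (out : List Int) : Decidable (Spec_count_winners winners my_numbers current_card out) := by unfold Spec_count_winners; infer_instance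

-- ===== CLAIM (what is proved, stated in full; the proofs are below) =====
def Claim_equal_count_winners : Prop := ∀ (winners : List Int) (my_numbers : List Int) (current_card : Int), Dom_count_winners winners my_numbers current_card → Spec_count_winners winners my_numbers current_card (count_winners winners my_numbers current_card)

-- ===== LEMMAS AND PROOFS =====

-- common description: the c+1, c+2, …, c+k sequence, k = number of matches
def cwSeq (winners : List Int) (my_numbers : List Int) (c : Int) : List Int :=
  (List.range (my_numbers.countP (winners.contains ·))).map (fun (j : Nat) => c + 1 + (j : Int))

theorem cwSeq_cons_pos (winners : List Int) (n : Int) (ms : List Int) (c : Int)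
    (h : winners.contains n = true) :
    cwSeq winners (n :: ms) c = (c + 1) :: cwSeq winners ms (c + 1) := by
  have h' : n ∈ winners := by simpa using h
  have hk : (n :: ms).countP (winners.contains ·) = ms.countP (winners.contains ·) + 1 := by
    simp [h']
  unfold cwSeq
  rw [hk, List.range_succ_eq_map, List.map_cons, List.map_map]
  congr 1
  · norm_num
  · refine List.map_congr_left fun j _ => ?_
    simp only [Function.comp_apply]
    push_cast
    ring

theorem cwSeq_cons_neg (winners : List Int) (n : Int) (ms : List Int) (c : Int)
    (h : winners.contains n = false) :
    cwSeq winners (n :: ms) c = cwSeq winners ms c := by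
  have h' : n ∉ winners := by simpa using h
  have hk : (n :: ms).countP (winners.contains ·) = ms.countP (winners.contains ·) := by
    simp [h']
  unfold cwSeq
  rw [hk]

theorem countA_loop (winners : List Int) (ms : List Int) (c : Int) (acc : List Int) :
    (ms.foldl
      (fun (st : Int × List Int) num =>
        if winners.contains num then (st.1 + 1, st.2 ++ [st.1 + 1]) else st)
      (c, acc)).2 = acc ++ cwSeq winners ms c := by
  induction ms generalizing c acc with
  | nil => simp [cwSeq]
  | cons n ms ih =>
    rw [List.foldl_cons]
    by_cases h : winners.contains n = true
    · rw [if_pos h, ih, cwSeq_cons_pos winners n ms c h]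
      simp
    · rw [if_neg h, ih, cwSeq_cons_neg winners n ms c (by simpa using h)]

theorem countB_loop (winners : List Int) (ms : List Int) (s : Int) :
    ms.foldl (fun s n => if winners.contains n then s + 1 else s) s
      = s + (ms.countP (winners.contains ·) : Int) := by
  induction ms generalizing s with
  | nil => simp
  | cons n ms ih =>
    rw [List.foldl_cons]
    by_cases h : winners.contains n = true
    · have h' : n ∈ winners := by simpa using h
      have hk : (n :: ms).countP (winners.contains ·) = ms.countP (winners.contains ·) + 1 := by
        simp [h']
      rw [if_pos h, ih, hk]
      push_cast
      ring
    · have h' : n ∉ winners := by simpa using h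
      have hk : (n :: ms).countP (winners.contains ·) = ms.countP (winners.contains ·) := by
        simp [h']
      rw [if_neg h, ih, hk]

theorem alt_eq_cwSeq (winners : List Int) (ms : List Int) (c : Int) :
    count_winners_alt winners ms c = cwSeq winners ms c := by
  show (PySem.List.pyRange 1
      (ms.foldl (fun s n => if winners.contains n then s + 1 else s) 0 + 1) 1).map
      (fun i => c + i) = cwSeq winners ms c
  rw [countB_loop winners ms 0, zero_add, PySem.List.pyRange_one]
  have ht : ((ms.countP (winners.contains ·) : Int) + 1 - 1).toNat
      = ms.countP (winners.contains ·) := by omega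
  rw [ht, List.map_map]
  unfold cwSeq
  refine List.map_congr_left fun j _ => ?_
  simp only [Function.comp_apply]
  ring

-- ===== VERDICT (by name: the statement is the Claim_ definition above) =====
theorem count_winners_spec : Claim_equal_count_winners := by
  intro winners my_numbers current_card _
  unfold Spec_count_winners count_winners
  rw [countA_loop, alt_eq_cwSeq]
  simp
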